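-- pv_equiv track=rewrite | github.com/CallumHoward/adventofcode | 2017/04/part2.py | no_duplicates
-- ===== SOURCE A (Python) =====
-- def no_duplicates(line):
--     words = set()
--     for word in line.split():
--         word = ''.join(sorted(word))
--         if word in words:
--             return False
--         words.add(word)
--     return True
-- ===== SOURCE B (Python) =====
-- def no_duplicates(line):
--     # pairwise anagram check: recurse head-vs-rest, no auxiliary set
--     def go(ws):
--         if not ws:
--             return True
--         head, rest = ws[0], ws[1:]
--         if any(sorted(head) == sorted(w) for w in rest):
--             return False
--         return go(rest)
--     return go(line.split())
-- ===== Notes on version B (the rewrite author's own statement) =====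
-- stated objective: alternative
-- what changed: Drops the seen-set entirely: B recursively compares each word's sorted characters against every later word (brute-force pairwise anagram test) instead of A's incremental membership set of signatures.
import Mathlib
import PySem

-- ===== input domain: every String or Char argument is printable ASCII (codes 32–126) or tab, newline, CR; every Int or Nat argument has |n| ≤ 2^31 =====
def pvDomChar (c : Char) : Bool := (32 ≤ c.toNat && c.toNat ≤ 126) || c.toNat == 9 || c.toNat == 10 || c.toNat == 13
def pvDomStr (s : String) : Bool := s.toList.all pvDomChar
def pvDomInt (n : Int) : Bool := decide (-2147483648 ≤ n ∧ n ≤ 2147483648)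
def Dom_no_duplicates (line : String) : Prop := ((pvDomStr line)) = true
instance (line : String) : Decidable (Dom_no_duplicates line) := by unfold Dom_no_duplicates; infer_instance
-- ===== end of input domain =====

-- B drops the seen-set: it recursively compares each word's sorted characters with
-- every later word (brute-force pairwise anagram test). Objective: alternative.

-- ===== PORT A =====
-- the signature ''.join(sorted(word)) is kept as its List Char (string equality = char-list equality)
def no_duplicates_loop (ws : List String) (words : PySem.Set (List Char)) : Bool :=
  match ws with
  | [] => true
  | w :: rest =>
      let word := PySem.List.sorted w.toList (fun c => c) false
      if PySem.Set.contains words word then false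
      else no_duplicates_loop rest (PySem.Set.add words word)

def no_duplicates (line : String) : Bool :=
  no_duplicates_loop (PySem.Str.split₀ line) PySem.Set.empty

-- ===== PORT B =====
def no_dup_go (ws : List String) : Bool :=
  match ws with
  | [] => true
  | head :: rest =>
      if rest.any (fun w =>
          PySem.List.sorted head.toList (fun c => c) false
            == PySem.List.sorted w.toList (fun c => c) false)
      then false
      else no_dup_go rest

def no_duplicates_alt (line : String) : Bool :=
  no_dup_go (PySem.Str.split₀ line)

-- ===== PRECONDITION & SPEC =====
def Spec_no_duplicates (line : String) (out : Bool) : Prop := out = no_duplicates_alt line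
instance (line : String) (out : Bool) : Decidable (Spec_no_duplicates line out) := by unfold Spec_no_duplicates; infer_instance

-- ===== CLAIM (what is proved, stated in full; the proofs are below) =====
def Claim_equal_no_duplicates : Prop := ∀ (line : String), Dom_no_duplicates line → Spec_no_duplicates line (no_duplicates line)

-- ===== LEMMAS AND PROOFS =====

def pvSig (w : String) : List Char := PySem.List.sorted w.toList (fun c => c) false

-- A's loop decides: signatures of ws are pairwise distinct AND none of them is already in the set
theorem pv_loopA (ws : List String) (s : PySem.Set (List Char)) :
    no_duplicates_loop ws s =
      (decide ((ws.map pvSig).Nodup) && decide (∀ x ∈ ws.map pvSig, x ∉ s)) := by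
  induction ws generalizing s with
  | nil => simp [no_duplicates_loop]
  | cons w rest ih =>
      simp only [no_duplicates_loop, List.map_cons]
      by_cases hmem : pvSig w ∈ s
      · rw [if_pos (by simpa [PySem.Set.contains_iff, pvSig] using hmem)]
        rw [Bool.eq_iff_iff]
        simp only [Bool.false_eq_true, false_iff, Bool.and_eq_true, decide_eq_true_eq]
        rintro ⟨-, h⟩; exact h _ (List.mem_cons_self ..) hmem
      · rw [if_neg (by simpa [PySem.Set.contains_iff, pvSig] using hmem)]
        show no_duplicates_loop rest (PySem.Set.add s (pvSig w))
          = (decide ((pvSig w :: rest.map pvSig).Nodup)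
              && decide (∀ x ∈ pvSig w :: rest.map pvSig, x ∉ s))
        rw [ih, Bool.eq_iff_iff]
        simp only [Bool.and_eq_true, decide_eq_true_eq, List.nodup_cons, List.mem_cons]
        constructor
        · rintro ⟨hnd, hall⟩
          have hw : pvSig w ∉ rest.map pvSig := fun hd =>
            hall _ hd (by simp [PySem.Set.mem_add])
          refine ⟨⟨hw, hnd⟩, ?_⟩
          rintro x (rfl | hx)
          · exact hmem
          · exact fun hxs => hall x hx (by rw [PySem.Set.mem_add]; exact Or.inl hxs)
        · rintro ⟨⟨hw, hnd⟩, hall⟩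
          refine ⟨hnd, fun x hx hxadd => ?_⟩
          rw [PySem.Set.mem_add] at hxadd
          rcases hxadd with h' | h'
          · exact hall x (Or.inr hx) h'
          · exact hw (h' ▸ hx)

-- B's recursion decides: signatures are pairwise distinct
theorem pv_loopB (ws : List String) :
    no_dup_go ws = decide ((ws.map pvSig).Nodup) := by
  induction ws with
  | nil => simp [no_dup_go]
  | cons w rest ih =>
      simp only [no_dup_go, List.map_cons]
      by_cases hdup : pvSig w ∈ rest.map pvSig
      · rw [if_pos]
        · rw [eq_comm, decide_eq_false_iff_not, List.nodup_cons]
          intro h; exact h.1 hdup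
        · rcases List.mem_map.mp hdup with ⟨v, hv, hsig⟩
          exact List.any_eq_true.mpr ⟨v, hv, by simp [pvSig] at hsig ⊢; exact hsig.symm⟩
      · rw [if_neg, ih]
        · simp [List.nodup_cons, hdup]
        · intro hany
          rcases List.any_eq_true.mp hany with ⟨v, hv, heq⟩
          exact hdup (List.mem_map.mpr ⟨v, hv, by simpa [pvSig] using (eq_of_beq heq).symm⟩)

-- ===== VERDICT (by name: the statement is the Claim_ definition above) =====
theorem no_duplicates_spec : Claim_equal_no_duplicates := by
  intro line _
  show no_duplicates line = no_duplicates_alt line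
  unfold no_duplicates no_duplicates_alt
  rw [pv_loopA, pv_loopB]
  simp [PySem.Set.empty]
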